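-- pv_equiv track=rewrite | github.com/blevinstein/adventofcode | 2020/20/part1.py | invert_fingerprint
-- ===== SOURCE A (Python) =====
-- def invert_fingerprint(fingerprint, length):
--   inverted_values = [invert_bitstring(value, length) for value in fingerprint]
--   return [
--       inverted_values[0],
--       inverted_values[3],
--       inverted_values[2],
--       inverted_values[1]
--   ]
--
-- def invert_bitstring(value, length):
--   return sum(1 << (length-i-1) for i in range(length) if value & (1 << i) > 0)
-- ===== SOURCE B (Python) =====
-- def invert_fingerprint(fingerprint, length):
--   # Divide-and-conquer bit reversal: reverse each half of the bit field
--   # recursively and swap the halves, instead of scanning bit positions.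
--   def rev(v, n):
--     if n <= 0:
--       return 0
--     if n == 1:
--       return v & 1
--     lo = n // 2
--     hi = n - lo
--     return rev(v, lo) * (1 << hi) + rev(v >> lo, hi)
--   return [rev(fingerprint[0], length),
--           rev(fingerprint[3], length),
--           rev(fingerprint[2], length),
--           rev(fingerprint[1], length)]
-- ===== Notes on version B (the rewrite author's own statement) =====
-- stated objective: faster
-- what changed: Replaces the per-position mask-test-and-sum reversal mapped over the whole fingerprint by a divide-and-conquer reversal (recursively reverse each half of the bit field and swap the halves), applied only to the four entries the result uses.
import Mathlib
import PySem

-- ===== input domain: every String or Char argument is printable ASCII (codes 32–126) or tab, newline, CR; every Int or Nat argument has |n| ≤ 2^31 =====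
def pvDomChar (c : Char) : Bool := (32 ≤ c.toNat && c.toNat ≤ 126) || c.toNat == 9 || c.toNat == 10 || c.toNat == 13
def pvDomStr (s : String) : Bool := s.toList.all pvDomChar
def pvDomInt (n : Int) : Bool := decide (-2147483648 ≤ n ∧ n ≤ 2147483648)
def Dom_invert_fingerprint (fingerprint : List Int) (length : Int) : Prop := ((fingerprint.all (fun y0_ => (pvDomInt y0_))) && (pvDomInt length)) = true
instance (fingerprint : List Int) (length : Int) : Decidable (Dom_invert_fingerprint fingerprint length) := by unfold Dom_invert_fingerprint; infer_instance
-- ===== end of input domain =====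

-- B replaces the per-position mask-test-and-sum bit reversal (mapped over the whole
-- fingerprint) by a divide-and-conquer reversal — recursively reverse each half of the
-- bit field and swap the halves — applied only to the four entries the result uses
-- (objective: faster, measured on growing fingerprints).

-- ===== PORT A =====
-- invert_bitstring: sum over i in range(length) of 1 << (length-i-1) when bit i is set.
-- Shift amounts i and length-i-1 are ≥ 0 for every i in range(length), so .toNat is exact.
def pv_invert_bitstring (value : Int) (length : Int) : Int :=
  (PySem.List.pyRange 0 length 1).foldl
    (fun s i =>
      if 0 < PySem.Int.band value ((1 : Int) <<< i.toNat) then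
        s + ((1 : Int) <<< (length - i - 1).toNat)
      else s) 0

def invert_fingerprint (fingerprint : List Int) (length : Int) : List Int :=
  let inverted_values := fingerprint.map (fun value => pv_invert_bitstring value length)
  [PySem.List.pyGetD inverted_values 0 0,
   PySem.List.pyGetD inverted_values 3 0,
   PySem.List.pyGetD inverted_values 2 0,
   PySem.List.pyGetD inverted_values 1 0]

-- ===== PORT B =====
-- rev: divide and conquer; n ≥ 2 branch has lo, hi ≥ 1 so both shifts' .toNat are exact.
def pv_rev (v : Int) (n : Int) : Int :=
  if n ≤ 0 then 0
  else if n = 1 then PySem.Int.band v 1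
  else
    let lo := PySem.Int.floordiv n 2
    let hi := n - lo
    pv_rev v lo * ((1 : Int) <<< hi.toNat) + pv_rev (v >>> lo.toNat) hi
termination_by n.toNat
decreasing_by
  all_goals
    simp only [PySem.Int.floordiv_eq_ediv_of_pos (by norm_num : (0:Int) < 2)]
    omega

def invert_fingerprint_alt (fingerprint : List Int) (length : Int) : List Int :=
  [pv_rev (PySem.List.pyGetD fingerprint 0 0) length,
   pv_rev (PySem.List.pyGetD fingerprint 3 0) length,
   pv_rev (PySem.List.pyGetD fingerprint 2 0) length,
   pv_rev (PySem.List.pyGetD fingerprint 1 0) length]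

-- ===== PRECONDITION & SPEC =====
-- A (and B) raise IndexError when the fingerprint has fewer than 4 entries.
def Pre_invert_fingerprint (fingerprint : List Int) (length : Int) : Prop :=
  4 ≤ fingerprint.length
instance (fingerprint : List Int) (length : Int) : Decidable (Pre_invert_fingerprint fingerprint length) := by unfold Pre_invert_fingerprint; infer_instance

def pvWitness_invert_fingerprint : List Int × Int := ([5, 6, 7, 8], 4)

def Spec_invert_fingerprint (fingerprint : List Int) (length : Int) (out : List Int) : Prop := out = invert_fingerprint_alt fingerprint length
instance (fingerprint : List Int) (length : Int) (out : List Int) : Decidable (Spec_invert_fingerprint fingerprint length out) := by unfold Spec_invert_fingerprint; infer_instance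

-- ===== CLAIM (what is proved, stated in full; the proofs are below) =====
def Claim_equal_invert_fingerprint : Prop := ∀ (fingerprint : List Int) (length : Int), Dom_invert_fingerprint fingerprint length → Pre_invert_fingerprint fingerprint length → Spec_invert_fingerprint fingerprint length (invert_fingerprint fingerprint length)

-- ===== LEMMAS AND PROOFS =====

theorem pv_one_shl (i : Nat) : (1 : Int) <<< i = 2 ^ i := by
  simp [Int.shiftLeft_eq]

theorem pv_one_shl_int (k : Nat) : (1 : Int) <<< ((k : Nat) : Int) = 2 ^ k := by
  rw [Int.one_shiftLeft]; push_cast [Nat.cast_pow]; rfl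

theorem pv_shr_natCast (m i : Nat) : ((m : Int)) >>> i = ((m >>> i : Nat) : Int) := by
  rw [Int.shiftRight_eq_div_pow, Nat.shiftRight_eq_div_pow]
  push_cast
  rfl

theorem pv_shr_negSucc (m i : Nat) : (Int.negSucc m) >>> i = Int.negSucc (m >>> i) := rfl

theorem pv_shr_add (v : Int) (a b : Nat) : v >>> a >>> b = v >>> (a + b) := by
  simp [Int.shiftRight_eq_div_pow, Int.ediv_ediv_of_nonneg, pow_add]

theorem pv_testBit_mod (m i : Nat) : m.testBit i = decide ((m >>> i) % 2 = 1) := by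
  simp [Nat.testBit, Nat.one_and_eq_mod_two]

-- the crux: the bit test "v & (1 << i) > 0" reads exactly the low bit of v >> i
theorem pv_band_pow (v : Int) (i : Nat) :
    (0 < PySem.Int.band v ((1 : Int) <<< i)) ↔ PySem.Int.mod (v >>> i) 2 = 1 := by
  rw [pv_one_shl]
  cases v with
  | ofNat m =>
    have h1 : ((2 : Int) ^ i) = ((2 ^ i : Nat) : Int) := by push_cast; rfl
    have h2 : (Int.ofNat m) = ((m : Nat) : Int) := rfl
    rw [h1, h2, PySem.Int.band_natCast, pv_shr_natCast, Nat.and_two_pow, pv_testBit_mod,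
      PySem.Int.mod_eq_emod_of_pos (by norm_num)]
    have hpow : 0 < 2 ^ i := Nat.two_pow_pos i
    rcases Nat.mod_two_eq_zero_or_one (m >>> i) with h | h <;> rw [h] <;> norm_num <;>
      rw [pv_shr_natCast] <;> omega
  | negSucc m =>
    have hneg : ¬ (0 : Int) ≤ Int.negSucc m := by omega
    have h1 : ((2 : Int) ^ i) = ((2 ^ i : Nat) : Int) := by push_cast; rfl
    have h2 : (-(Int.negSucc m) - 1).toNat = m := by
      rw [Int.negSucc_eq]; omega
    rw [h1]
    unfold PySem.Int.band
    rw [if_neg hneg, if_pos (by positivity), h2, Int.toNat_natCast,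
      Nat.and_comm, Nat.and_two_pow, pv_shr_negSucc,
      PySem.Int.mod_eq_emod_of_pos (by norm_num), pv_testBit_mod]
    have hk : (Int.negSucc (m >>> i)) = -((m >>> i : Nat) : Int) - 1 := by
      rw [Int.negSucc_eq]; ring
    rw [hk]
    have hpow : 0 < 2 ^ i := Nat.two_pow_pos i
    rcases Nat.mod_two_eq_zero_or_one (m >>> i) with h | h <;> rw [h] <;> norm_num <;>
      rw [pv_shr_natCast] <;> omega

-- bit j of v >> lo is bit lo + j of v
theorem pv_bit_shift (v : Int) (lo j : Nat) :
    (0 < PySem.Int.band (v >>> lo) ((1 : Int) <<< j)) ↔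
      (0 < PySem.Int.band v ((1 : Int) <<< (lo + j))) := by
  rw [pv_band_pow, pv_band_pow, pv_shr_add]

-- the reversed value both programs compute, as an explicit sum over bit positions
def pv_sumS (n : Nat) (v : Int) : Int :=
  ((List.range n).map
    (fun (k : Nat) => if 0 < PySem.Int.band v ((1 : Int) <<< k) then (1 : Int) <<< (n - 1 - k) else 0)).sum

-- fold-with-guarded-add is the sum of the guarded terms
theorem pv_foldl_if_add {α : Type} (P : α → Prop) [DecidablePred P] (g : α → Int) :
    ∀ (l : List α) (a : Int),
      l.foldl (fun s k => if P k then s + g k else s) a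
        = a + (l.map (fun k => if P k then g k else 0)).sum := by
  intro l
  induction l with
  | nil => simp
  | cons x xs ih =>
    intro a
    by_cases h : P x <;> simp [h, ih] <;> ring

theorem pv_band_one_cases (v : Int) :
    PySem.Int.band v 1 = if 0 < PySem.Int.band v ((1 : Int) <<< (0 : Nat)) then 1 else 0 := by
  have h0 : ((1 : Int) <<< (0 : Nat)) = 1 := by rw [pv_one_shl]; norm_num
  rw [h0, PySem.Int.band_one]
  have h1 := PySem.Int.mod_nonneg v (b := 2) (by norm_num)
  have h2 := PySem.Int.mod_lt v (b := 2) (by norm_num)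
  split_ifs with h <;> omega

theorem pv_sumS_one (v : Int) : pv_sumS 1 v = PySem.Int.band v 1 := by
  rw [pv_band_one_cases]
  simp [pv_sumS, List.range_succ]

-- splitting the bit field: low lo bits reversed into the top, high hi bits into the bottom
theorem pv_sumS_split (lo hi : Nat) (v : Int) :
    pv_sumS (lo + hi) v = pv_sumS lo v * 2 ^ hi + pv_sumS hi (v >>> lo) := by
  unfold pv_sumS
  rw [List.range_add, List.map_append, List.sum_append, List.map_map]
  congr 1
  · rw [← List.sum_map_mul_right]
    refine congrArg List.sum (List.map_congr_left (fun k hk => ?_))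
    rw [List.mem_range] at hk
    have h : lo + hi - 1 - k = (lo - 1 - k) + hi := by omega
    rw [h]
    split_ifs with hb
    · rw [pv_one_shl, pv_one_shl, pow_add]
    · ring
  · refine congrArg List.sum (List.map_congr_left (fun j hj => ?_))
    rw [List.mem_range] at hj
    simp only [Function.comp_apply]
    have h : lo + hi - 1 - (lo + j) = hi - 1 - j := by omega
    rw [h, if_congr (pv_bit_shift v lo j).symm rfl rfl]

-- B's divide-and-conquer reversal computes the same sum
theorem pv_rev_eq_sumS : ∀ (m : Nat) (n v : Int), n.toNat = m → pv_rev v n = pv_sumS m v := by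
  intro m
  induction m using Nat.strong_induction_on with
  | _ m ih =>
    intro n v hm
    rw [pv_rev]
    split_ifs with h0 h1
    · have : m = 0 := by omega
      simp [this, pv_sumS]
    · have : m = 1 := by omega
      rw [this, pv_sumS_one]
    · have h2 : 2 ≤ n := by omega
      have hfd : PySem.Int.floordiv n 2 = n / 2 :=
        PySem.Int.floordiv_eq_ediv_of_pos (by norm_num)
      simp only [hfd]
      have hlo : (n / 2).toNat < m := by omega
      have hhi : (n - n / 2).toNat < m := by omega
      have hsum : (n / 2).toNat + (n - n / 2).toNat = m := by omega
      rw [ih _ hlo _ _ rfl, ih _ hhi _ _ rfl, ← hsum, pv_sumS_split, pv_one_shl]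

-- A's mask-test-and-sum reversal computes the same sum
theorem pv_bitstring_eq_sumS (v length : Int) :
    pv_invert_bitstring v length = pv_sumS length.toNat v := by
  by_cases h : length ≤ 0
  · unfold pv_invert_bitstring
    rw [PySem.List.pyRange_one_eq_nil (by omega)]
    have : length.toNat = 0 := by omega
    simp [this, pv_sumS]
  · have h : 0 < length := by omega
    unfold pv_invert_bitstring
    rw [PySem.List.pyRange_one]
    have hL : (length - 0).toNat = length.toNat := by omega
    rw [hL, List.foldl_map]
    rw [PySem.List.foldl_congr_mem _ _
      (fun (s : Int) (k : Nat) =>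
        if 0 < PySem.Int.band v ((1 : Int) <<< k) then
          s + ((1 : Int) <<< (length.toNat - 1 - k)) else s) 0
      (by
        intro acc k hk
        rw [List.mem_range] at hk
        have h1 : ((0 : Int) + (k : Int)).toNat = k := by omega
        have h2 : (length - (0 + (k : Int)) - 1).toNat = length.toNat - 1 - k := by omega
        simp only [h1, h2, Nat.cast_zero, pv_one_shl, pv_one_shl_int])]
    rw [pv_foldl_if_add (fun (k : Nat) => 0 < PySem.Int.band v ((1 : Int) <<< k))
      (fun (k : Nat) => (1 : Int) <<< (length.toNat - 1 - k))]
    unfold pv_sumS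
    ring

-- ===== VERDICT (by name: the statement is the Claim_ definition above) =====
theorem invert_fingerprint_spec : Claim_equal_invert_fingerprint := by
  intro fingerprint length _hdom hpre
  unfold Pre_invert_fingerprint at hpre
  unfold Spec_invert_fingerprint
  simp only [invert_fingerprint, invert_fingerprint_alt]
  have hidx : ∀ i : Int, 0 ≤ i → i < 4 →
      PySem.List.pyGetD (fingerprint.map (fun value => pv_invert_bitstring value length)) i 0
        = pv_rev (PySem.List.pyGetD fingerprint i 0) length := by
    intro i h0 h4
    rw [PySem.List.pyGetD_eq_getElem _ _ h0 (by simp; omega),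
        PySem.List.pyGetD_eq_getElem _ _ h0 (by push_cast; omega)]
    simp only [List.getElem_map]
    rw [pv_bitstring_eq_sumS, pv_rev_eq_sumS length.toNat length _ rfl]
  rw [hidx 0 (by omega) (by omega), hidx 3 (by omega) (by omega),
      hidx 2 (by omega) (by omega), hidx 1 (by omega) (by omega)]
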